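-- pv_equiv track=rewrite | github.com/pypi-data/pypi-mirror-396 | packages/nano-template/nano_template-0.1.1-cp39-abi3-win_arm64.whl/nano_template/_pure.py | error_context
-- ===== SOURCE A (Python) =====
-- def error_context(text: str, index: int) -> tuple[int, int, str] | None:
--     """Return the line number, column number and current line of text."""
--     lines = text.splitlines(keepends=True)
--     cumulative_length = 0
--     target_line_index = -1
--
--     for i, line in enumerate(lines):
--         cumulative_length += len(line)
--         if index < cumulative_length:
--             target_line_index = i
--             break
--
--     if target_line_index == -1:
--         return None
--
--     line_number = target_line_index + 1  # 1-based
--     column_number = index - (cumulative_length - len(lines[target_line_index]))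
--     current_line = lines[target_line_index].rstrip()
--     return (line_number, column_number, current_line)
-- ===== SOURCE B (Python) =====
-- def error_context(text: str, index: int) -> tuple[int, int, str] | None:
--     """Return the line number, column number and current line of text."""
--     lines = text.splitlines(keepends=True)
--     ends = []
--     total = 0
--     for line in lines:
--         total += len(line)
--         ends.append(total)
--     # binary search for the first i with index < ends[i]
--     lo, hi = 0, len(ends)
--     while lo < hi:
--         mid = (lo + hi) // 2
--         if index < ends[mid]:
--             hi = mid
--         else:
--             lo = mid + 1
--     if lo == len(ends):
--         return None
--     start = ends[lo - 1] if lo > 0 else 0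
--     return (lo + 1, index - start, lines[lo].rstrip())
-- ===== Notes on version B (the rewrite author's own statement) =====
-- stated objective: alternative
-- what changed: Replaces the linear scan with a break by a prefix table of cumulative line end-offsets plus a hand-rolled binary search (bisect_right) that locates the target line; the column is recovered from the previous cumulative end.
import Mathlib
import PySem

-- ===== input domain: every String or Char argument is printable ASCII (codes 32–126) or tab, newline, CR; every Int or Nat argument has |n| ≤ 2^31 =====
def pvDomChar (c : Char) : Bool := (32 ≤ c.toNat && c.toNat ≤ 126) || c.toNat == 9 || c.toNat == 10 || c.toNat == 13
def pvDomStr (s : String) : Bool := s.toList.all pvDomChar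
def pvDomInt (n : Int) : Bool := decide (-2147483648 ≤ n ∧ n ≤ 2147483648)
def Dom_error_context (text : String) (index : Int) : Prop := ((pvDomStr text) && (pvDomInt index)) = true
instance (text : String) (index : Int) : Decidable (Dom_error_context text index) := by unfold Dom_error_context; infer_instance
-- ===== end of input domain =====

-- B replaces A's linear scan-with-break by a cumulative end-offset table and a binary search; alternative algorithm, same results.

-- ===== PORT A =====
-- shared helper: text.splitlines(keepends=True); exact on Dom (line breaks there are '\n', '\r\n', '\r')
-- fuel = remaining length makes the recursion structural; the 0/non-nil case is unreachable
def skGo : Nat → List Char → List Char → List (List Char)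
  | _, [], acc => if acc.isEmpty then [] else [acc.reverse]
  | 0, _ :: _, _ => []
  | fuel + 1, c :: rest, acc =>
    if c = '\n' then (acc.reverse ++ ['\n']) :: skGo fuel rest []
    else if c = '\r' then
      match rest with
      | '\n' :: rest' => (acc.reverse ++ ['\r', '\n']) :: skGo fuel rest' []
      | _ => (acc.reverse ++ ['\r']) :: skGo fuel rest []
    else skGo fuel rest (c :: acc)

def splitKeepends (s : List Char) : List (List Char) := skGo s.length s []

-- A's for-loop with break: cumulative length and target index
def ecGo (index : Int) : List (List Char) → Int → Int → Option (Int × Int)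
  | [], _i, _cum => none
  | l :: ls, i, cum =>
    let c := cum + (l.length : Int)
    if index < c then some (i, c) else ecGo index ls (i + 1) c

def error_context (text : String) (index : Int) : Option (Int × Int × String) :=
  let lines := splitKeepends text.toList
  match ecGo index lines 0 0 with
  | none => none
  | some (i, c) =>
    let line := lines.getD i.toNat []
    some (i + 1, index - (c - (line.length : Int)), String.ofList (PySem.Chars.rstrip line))

-- ===== PORT B =====
-- Source B's loop appending cumulative end offsets
def buildEnds (lines : List (List Char)) : Int × List Int :=
  lines.foldl (fun st l => (st.1 + (l.length : Int), st.2 ++ [st.1 + (l.length : Int)])) (0, [])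

-- Source B's hand-rolled binary search (first i with index < ends[i])
def bsGo (index : Int) (ends : List Int) : Nat → Nat → Nat → Nat
  | 0, lo, _hi => lo
  | fuel + 1, lo, hi =>
    if lo < hi then
      let mid := (lo + hi) / 2
      if index < ends.getD mid 0 then bsGo index ends fuel lo mid
      else bsGo index ends fuel (mid + 1) hi
    else lo

-- the while loop halves hi - lo, so hi - lo steps of fuel always suffice
def bsearch (index : Int) (ends : List Int) (lo hi : Nat) : Nat :=
  bsGo index ends (hi - lo) lo hi

def error_context_alt (text : String) (index : Int) : Option (Int × Int × String) :=
  let lines := splitKeepends text.toList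
  let ends := (buildEnds lines).2
  let lo := bsearch index ends 0 ends.length
  if lo = ends.length then none
  else
    let start := if 0 < lo then ends.getD (lo - 1) 0 else 0
    some ((lo : Int) + 1, index - start, String.ofList (PySem.Chars.rstrip (lines.getD lo [])))

-- ===== PRECONDITION & SPEC =====
def Spec_error_context (text : String) (index : Int) (out : Option (Int × Int × String)) : Prop := out = error_context_alt text index
instance (text : String) (index : Int) (out : Option (Int × Int × String)) : Decidable (Spec_error_context text index out) := by unfold Spec_error_context; infer_instance

-- ===== CLAIM (what is proved, stated in full; the proofs are below) =====
def Claim_equal_error_context : Prop := ∀ (text : String) (index : Int), Dom_error_context text index → Spec_error_context text index (error_context text index)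

-- ===== LEMMAS AND PROOFS =====

-- the cumulative end-offsets of a line list, starting from cum
def endsFrom (cum : Int) : List (List Char) → List Int
  | [] => []
  | l :: ls => (cum + (l.length : Int)) :: endsFrom (cum + (l.length : Int)) ls

theorem buildEnds_snd_aux (ls : List (List Char)) : ∀ (cum : Int) (acc : List Int),
    (ls.foldl (fun st l => (st.1 + (l.length : Int), st.2 ++ [st.1 + (l.length : Int)])) (cum, acc)).2
      = acc ++ endsFrom cum ls := by
  induction ls with
  | nil => intro cum acc; simp [endsFrom]
  | cons l ls ih => intro cum acc; simp [endsFrom, ih, List.append_assoc]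

theorem buildEnds_snd (ls : List (List Char)) : (buildEnds ls).2 = endsFrom 0 ls := by
  simpa using buildEnds_snd_aux ls 0 []

theorem endsFrom_length (ls : List (List Char)) : ∀ cum, (endsFrom cum ls).length = ls.length := by
  induction ls with
  | nil => intro cum; simp [endsFrom]
  | cons l ls ih => intro cum; simp [endsFrom, ih]

theorem endsFrom_le (ls : List (List Char)) : ∀ (cum : Int) (j : Nat), j < ls.length →
    cum ≤ (endsFrom cum ls).getD j 0 := by
  induction ls with
  | nil => intro cum j h; simp at h
  | cons l ls ih =>
    intro cum j h
    cases j with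
    | zero => simp only [endsFrom, List.getD_cons_zero]; omega
    | succ j =>
      have := ih (cum + (l.length : Int)) j (by simpa using h)
      simp only [endsFrom, List.getD_cons_succ]
      have : cum ≤ cum + (l.length : Int) := by omega
      omega

theorem endsFrom_mono (ls : List (List Char)) : ∀ (cum : Int) (j k : Nat), j ≤ k → k < ls.length →
    (endsFrom cum ls).getD j 0 ≤ (endsFrom cum ls).getD k 0 := by
  induction ls with
  | nil => intro cum j k _ h; simp at h
  | cons l ls ih =>
    intro cum j k hjk hk
    cases k with
    | zero => interval_cases j; rfl
    | succ k =>
      cases j with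
      | zero =>
        simp only [endsFrom, List.getD_cons_zero, List.getD_cons_succ]
        exact endsFrom_le ls _ k (by simpa using hk)
      | succ j =>
        simp only [endsFrom, List.getD_cons_succ]
        exact ih _ j k (by omega) (by simpa using hk)

theorem endsFrom_sub (ls : List (List Char)) : ∀ (cum : Int) (j : Nat), j < ls.length →
    (endsFrom cum ls).getD j 0 - ((ls.getD j []).length : Int)
      = if j = 0 then cum else (endsFrom cum ls).getD (j - 1) 0 := by
  induction ls with
  | nil => intro cum j h; simp at h
  | cons l ls ih =>
    intro cum j h
    cases j with
    | zero => simp [endsFrom]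
    | succ j =>
      have hj : j < ls.length := by simpa using h
      have := ih (cum + (l.length : Int)) j hj
      cases j with
      | zero =>
        simp only [endsFrom, List.getD_cons_succ] at this ⊢
        simpa using this
      | succ j =>
        simp only [endsFrom, List.getD_cons_succ] at this ⊢
        simpa using this

-- A's loop: no line contains the index → none
theorem ecGo_none (index : Int) (ls : List (List Char)) : ∀ (i cum : Int),
    (∀ j, j < ls.length → ¬ index < (endsFrom cum ls).getD j 0) →
    ecGo index ls i cum = none := by
  induction ls with
  | nil => intro i cum _; rfl
  | cons l ls ih =>
    intro i cum h
    have h0 := h 0 (by simp)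
    simp only [endsFrom, List.getD_cons_zero] at h0
    simp only [ecGo, if_neg h0]
    exact ih (i + 1) (cum + (l.length : Int)) fun j hj => by
      have := h (j + 1) (by simpa using Nat.succ_lt_succ hj)
      simpa [endsFrom] using this

-- A's loop: j is the first line end exceeding index → break at j
theorem ecGo_some (index : Int) (ls : List (List Char)) : ∀ (i cum : Int) (j : Nat),
    j < ls.length → index < (endsFrom cum ls).getD j 0 →
    (∀ k, k < j → ¬ index < (endsFrom cum ls).getD k 0) →
    ecGo index ls i cum = some (i + (j : Int), (endsFrom cum ls).getD j 0) := by
  induction ls with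
  | nil => intro i cum j h; simp at h
  | cons l ls ih =>
    intro i cum j hj hPj hmin
    cases j with
    | zero =>
      simp only [endsFrom, List.getD_cons_zero] at hPj
      simp [ecGo, hPj, endsFrom]
    | succ j =>
      have h0 := hmin 0 (Nat.succ_pos j)
      simp only [endsFrom, List.getD_cons_zero] at h0
      simp only [ecGo, if_neg h0]
      have := ih (i + 1) (cum + (l.length : Int)) j (by simpa using hj)
        (by simpa [endsFrom] using hPj)
        (fun k hk => by
          have := hmin (k + 1) (by omega)
          simpa [endsFrom] using this)
      rw [this]
      congr 2
      push_cast; ring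

-- Source B's binary search finds the first index where the predicate holds, given monotone ends
theorem bsGo_spec (index : Int) (ends : List Int)
    (hm : ∀ j k, j ≤ k → k < ends.length → ends.getD j 0 ≤ ends.getD k 0) :
    ∀ (n lo hi : Nat), hi - lo ≤ n → lo ≤ hi → hi ≤ ends.length →
    (∀ j, j < lo → ¬ index < ends.getD j 0) →
    (∀ j, hi ≤ j → j < ends.length → index < ends.getD j 0) →
    (∀ j, j < bsGo index ends n lo hi → ¬ index < ends.getD j 0) ∧
    (∀ j, bsGo index ends n lo hi ≤ j → j < ends.length → index < ends.getD j 0) ∧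
    lo ≤ bsGo index ends n lo hi ∧ bsGo index ends n lo hi ≤ hi := by
  intro n
  induction n with
  | zero =>
    intro lo hi hn hlohi hhi hlow hhigh
    have : lo = hi := by omega
    subst this
    exact ⟨hlow, hhigh, le_refl _, le_refl _⟩
  | succ n ih =>
    intro lo hi hn hlohi hhi hlow hhigh
    simp only [bsGo]
    by_cases h : lo < hi
    · rw [if_pos h]
      by_cases hmid : index < ends.getD ((lo + hi) / 2) 0
      · rw [if_pos hmid]
        have := ih lo ((lo + hi) / 2) (by omega) (by omega) (by omega) hlow
          (fun j hj hjlen => lt_of_lt_of_le hmid (hm _ j hj hjlen))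
        exact ⟨this.1, this.2.1, this.2.2.1, le_trans this.2.2.2 (by omega)⟩
      · rw [if_neg hmid]
        have := ih ((lo + hi) / 2 + 1) hi (by omega) (by omega) hhi
          (fun j hj => by
            by_cases hjlo : j < lo
            · exact hlow j hjlo
            · intro hP
              exact hmid (lt_of_lt_of_le hP (hm j ((lo + hi) / 2) (by omega) (by omega))))
          hhigh
        exact ⟨this.1, this.2.1, by omega, this.2.2.2⟩
    · rw [if_neg h]
      have : lo = hi := by omega
      subst this
      exact ⟨hlow, hhigh, le_refl _, le_refl _⟩

theorem bsearch_spec (index : Int) (ends : List Int)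
    (hm : ∀ j k, j ≤ k → k < ends.length → ends.getD j 0 ≤ ends.getD k 0)
    (lo hi : Nat) (hlohi : lo ≤ hi) (hhi : hi ≤ ends.length)
    (hlow : ∀ j, j < lo → ¬ index < ends.getD j 0)
    (hhigh : ∀ j, hi ≤ j → j < ends.length → index < ends.getD j 0) :
    (∀ j, j < bsearch index ends lo hi → ¬ index < ends.getD j 0) ∧
    (∀ j, bsearch index ends lo hi ≤ j → j < ends.length → index < ends.getD j 0) ∧
    lo ≤ bsearch index ends lo hi ∧ bsearch index ends lo hi ≤ hi :=
  bsGo_spec index ends hm (hi - lo) lo hi (le_refl _) hlohi hhi hlow hhigh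

-- ===== VERDICT (by name: the statement is the Claim_ definition above) =====
theorem error_context_spec : Claim_equal_error_context := by
  intro text index _
  unfold Spec_error_context error_context error_context_alt
  simp only [buildEnds_snd]
  set lines := splitKeepends text.toList with hlines
  set ends := endsFrom 0 lines with hends
  have hlen : ends.length = lines.length := endsFrom_length lines 0
  have hm : ∀ j k, j ≤ k → k < ends.length → ends.getD j 0 ≤ ends.getD k 0 := by
    intro j k hjk hk; exact endsFrom_mono lines 0 j k hjk (hlen ▸ hk)
  have hbs := bsearch_spec index ends hm 0 ends.length (by omega) (le_refl _)
    (by omega) (by omega)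
  set r := bsearch index ends 0 ends.length with hr
  by_cases hall : ∀ j, j < lines.length → ¬ index < ends.getD j 0
  · -- no line end exceeds index: both return none
    rw [ecGo_none index lines 0 0 hall]
    have hrlen : r = ends.length := by
      by_contra hne
      have hrlt : r < ends.length := lt_of_le_of_ne (hlen ▸ hbs.2.2.2) hne
      exact hall r (hlen ▸ hrlt) (hbs.2.1 r (le_refl _) hrlt)
    simp [hrlen]
  · -- some line contains index: r is the first such line
    push Not at hall
    have hex : ∃ j, j < lines.length ∧ index < ends.getD j 0 := hall
    have hlt : r < ends.length := by
      by_contra hge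
      obtain ⟨j, hj, hPj⟩ := hex
      have : r = ends.length := by omega
      exact hbs.1 j (by omega) hPj
    have hPr : index < ends.getD r 0 := hbs.2.1 r (le_refl _) hlt
    rw [ecGo_some index lines 0 0 r (hlen ▸ hlt) hPr hbs.1]
    have hrne : ¬ r = ends.length := by omega
    simp only [hrne, if_false, zero_add, Int.toNat_natCast]
    have hsub := endsFrom_sub lines 0 r (hlen ▸ hlt)
    rw [← hends] at hsub
    congr 2
    rw [hsub]
    by_cases h0 : r = 0
    · simp [h0]
    · simp [h0, Nat.pos_of_ne_zero h0]
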